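-- pv_equiv track=rewrite | github.com/paupedros/Portfolio- | Diccionarios/transform.py | transform
-- ===== SOURCE A (Python) =====
-- def length(l):
--     if len(l) == 0:
--         return False
--     else:
--         for element in l:
--             count = 0
--             for se in l:
--                 if len(element) == len(se):
--                     count += 1
--                     if count > 1:
--                         return True
--         return False
--
-- def transform(l):
--     dicc = {}
--     if length(l):
--         return dicc
--     else:
--         for element in l:
--             dicc[len(element)] = element
--     return dicc
-- ===== SOURCE B (Python) =====
-- def transform(l):
--     d = {len(e): e for e in l}
--     return d if len(d) == len(l) else {}
-- ===== Notes on version B (the rewrite author's own statement) =====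
-- stated objective: simpler
-- what changed: Replaces A's nested duplicate-length scan plus separate build loop with a single dict comprehension whose size, compared with len(l), decides whether a length collision occurred.
import Mathlib
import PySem

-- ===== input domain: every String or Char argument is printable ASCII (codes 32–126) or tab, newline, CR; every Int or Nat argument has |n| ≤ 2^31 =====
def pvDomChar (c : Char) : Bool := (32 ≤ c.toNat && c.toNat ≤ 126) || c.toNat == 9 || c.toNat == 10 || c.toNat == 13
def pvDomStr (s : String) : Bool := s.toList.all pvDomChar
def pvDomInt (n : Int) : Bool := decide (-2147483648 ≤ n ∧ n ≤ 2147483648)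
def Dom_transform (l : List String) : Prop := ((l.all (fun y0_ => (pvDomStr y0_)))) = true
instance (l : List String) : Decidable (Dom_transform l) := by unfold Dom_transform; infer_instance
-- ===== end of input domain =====

-- B replaces A's quadratic duplicate-length scan by one dict build plus a size comparison (simpler, one pass).

-- ===== PORT A =====
-- inner loop of `length`: for se in l: if len(element)==len(se): count += 1; if count > 1: return True
def pvInnerA (e : String) (l : List String) (count : Int) : Bool :=
  match l with
  | [] => false
  | se :: rest =>
    if PySem.Str.len e = PySem.Str.len se then
      if count + 1 > 1 then true else pvInnerA e rest (count + 1)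
    else pvInnerA e rest count

-- outer loop of `length`: for element in l: … ; return False
def pvOuterA (l full : List String) : Bool :=
  match l with
  | [] => false
  | e :: rest => if pvInnerA e full 0 then true else pvOuterA rest full

def pvLengthA (l : List String) : Bool :=
  if l.length = 0 then false else pvOuterA l l

def transform (l : List String) : List (Int × String) :=
  let dicc : PySem.Dict Int String := PySem.Dict.empty
  if pvLengthA l then dicc.items
  else (l.foldl (fun d e => d.insert (PySem.Str.len e) e) dicc).items

-- ===== PORT B =====
def transform_alt (l : List String) : List (Int × String) :=
  let d := l.foldl (fun d e => d.insert (PySem.Str.len e) e)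
             (PySem.Dict.empty : PySem.Dict Int String)
  if d.size = l.length then d.items else []

-- ===== PRECONDITION & SPEC =====
def Spec_transform (l : List String) (out : List (Int × String)) : Prop := out = transform_alt l
instance (l : List String) (out : List (Int × String)) : Decidable (Spec_transform l out) := by unfold Spec_transform; infer_instance

-- ===== CLAIM (what is proved, stated in full; the proofs are below) =====
def Claim_equal_transform : Prop := ∀ (l : List String), Dom_transform l → Spec_transform l (transform l)

-- ===== LEMMAS AND PROOFS =====

theorem pvInnerA_one (e : String) (l : List String) :
    pvInnerA e l 1 = true ↔ 1 ≤ (l.map PySem.Str.len).count (PySem.Str.len e) := by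
  induction l with
  | nil => simp [pvInnerA]
  | cons se rest ih =>
    simp only [pvInnerA]
    by_cases h : PySem.Str.len e = PySem.Str.len se
    · have hN : se.length = e.length := by simp [PySem.Str.len_eq] at h; omega
      rw [if_pos h, if_pos (by norm_num : (1:Int) + 1 > 1)]
      simp [PySem.Str.len_eq, hN]
    · have hN : ¬ se.length = e.length := by
        intro hc; exact h (by simp [PySem.Str.len_eq, hc])
      rw [if_neg h]
      simp [PySem.Str.len_eq, hN, ih]

theorem pvInnerA_zero (e : String) (l : List String) :
    pvInnerA e l 0 = true ↔ 2 ≤ (l.map PySem.Str.len).count (PySem.Str.len e) := by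
  induction l with
  | nil => simp [pvInnerA]
  | cons se rest ih =>
    simp only [pvInnerA]
    by_cases h : PySem.Str.len e = PySem.Str.len se
    · have hN : se.length = e.length := by simp [PySem.Str.len_eq] at h; omega
      rw [if_pos h, if_neg (by norm_num : ¬ ((0:Int) + 1 > 1))]
      rw [show (0:Int) + 1 = 1 from by norm_num, pvInnerA_one]
      simp [PySem.Str.len_eq, hN]
    · have hN : ¬ se.length = e.length := by
        intro hc; exact h (by simp [PySem.Str.len_eq, hc])
      rw [if_neg h]
      simp [PySem.Str.len_eq, hN, ih]

theorem pvOuterA_iff (l full : List String) :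
    pvOuterA l full = true ↔ ∃ e ∈ l, pvInnerA e full 0 = true := by
  induction l with
  | nil => simp [pvOuterA]
  | cons e rest ih =>
    by_cases h : pvInnerA e full 0 = true
    · simp [pvOuterA, h]
    · simp [pvOuterA, h, ih]

theorem pvLengthA_iff (l : List String) :
    pvLengthA l = true ↔ ¬ (l.map PySem.Str.len).Nodup := by
  constructor
  · intro h
    unfold pvLengthA at h
    split at h
    · exact absurd h (by simp)
    · obtain ⟨e, _, he⟩ := (pvOuterA_iff l l).mp h
      rw [pvInnerA_zero] at he
      intro hnd
      have := (List.nodup_iff_count_le_one.mp hnd) (PySem.Str.len e)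
      omega
  · intro hnd
    obtain ⟨a, ha⟩ := not_forall.mp (fun h => hnd (List.nodup_iff_count_le_one.mpr h))
    have ha2 : 2 ≤ (l.map PySem.Str.len).count a := by omega
    have hmem : a ∈ l.map PySem.Str.len := by
      rw [← List.count_pos_iff]; omega
    obtain ⟨e, hel, hea⟩ := List.mem_map.mp hmem
    have hne : l ≠ [] := by rintro rfl; simp at hel
    unfold pvLengthA
    have : l.length ≠ 0 := by simpa using hne
    simp only [this, if_false]
    exact (pvOuterA_iff l l).mpr ⟨e, hel, (pvInnerA_zero e l).mpr (by rw [hea]; omega)⟩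

theorem ofList_length_iff (xs : List Int) :
    (PySem.Set.ofList xs).length = xs.length ↔ xs.Nodup := by
  induction xs using List.reverseRecOn with
  | nil => simp
  | append_singleton xs x ih =>
    rw [PySem.Set.ofList_append_singleton, PySem.Set.add_eq_ite]
    have hle := PySem.Set.length_ofList_le (xs := xs)
    by_cases hx : x ∈ PySem.Set.ofList xs
    · have hx' : x ∈ xs := (PySem.Set.mem_ofList _ _).mp hx
      have hnd : ¬ (xs ++ [x]).Nodup := by simp [List.nodup_append, hx']
      simp only [hx, if_true, List.length_append, List.length_singleton, hnd, iff_false]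
      omega
    · have hx' : x ∉ xs := fun h => hx ((PySem.Set.mem_ofList _ _).mpr h)
      have hnd : (xs ++ [x]).Nodup ↔ xs.Nodup := by
        simp [List.nodup_append]
        exact fun _ a ha hax => hx' (hax ▸ ha)
      simp only [hx, if_false, List.length_append, List.length_singleton, hnd]
      constructor
      · intro h; exact ih.mp (by omega)
      · intro h; have := ih.mpr h; omega

theorem size_fold (l : List String) :
    (l.foldl (fun d e => d.insert (PySem.Str.len e) e)
        (PySem.Dict.empty : PySem.Dict Int String)).size
      = (PySem.Set.ofList (l.map PySem.Str.len)).length := by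
  have hk : (l.foldl (fun d e => d.insert (PySem.Str.len e) e)
      (PySem.Dict.empty : PySem.Dict Int String)).keys
      = PySem.Set.ofList (l.map PySem.Str.len) := by
    have := PySem.Dict.keys_foldl_insert_key (l := l) (key := PySem.Str.len)
      (f := fun _ e => e) (d := (PySem.Dict.empty : PySem.Dict Int String))
    simpa [PySem.Dict.keys_empty, PySem.Set.update_nil_left] using this
  have hsz : (l.foldl (fun d e => d.insert (PySem.Str.len e) e)
      (PySem.Dict.empty : PySem.Dict Int String)).size
      = (l.foldl (fun d e => d.insert (PySem.Str.len e) e)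
      (PySem.Dict.empty : PySem.Dict Int String)).keys.length := by
    simp [PySem.Dict.size, PySem.Dict.keys]
  rw [hsz, hk]

-- ===== VERDICT (by name: the statement is the Claim_ definition above) =====
theorem transform_spec : Claim_equal_transform := by
  intro l _
  unfold Spec_transform transform transform_alt
  by_cases h : (l.map PySem.Str.len).Nodup
  · have hA : pvLengthA l = false := by
      cases hb : pvLengthA l
      · rfl
      · exact absurd h ((pvLengthA_iff l).mp hb)
    have hB : (l.foldl (fun d e => d.insert (PySem.Str.len e) e)
        (PySem.Dict.empty : PySem.Dict Int String)).size = l.length := by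
      rw [size_fold, show l.length = (l.map PySem.Str.len).length by simp]
      exact (ofList_length_iff _).mpr h
    simp only [hA, Bool.false_eq_true, if_false]
    rw [if_pos (by simpa [PySem.Str.len_eq] using hB)]
  · have hA : pvLengthA l = true := (pvLengthA_iff l).mpr h
    have hB : (l.foldl (fun d e => d.insert (PySem.Str.len e) e)
        (PySem.Dict.empty : PySem.Dict Int String)).size ≠ l.length := by
      rw [size_fold]
      intro hc
      exact h ((ofList_length_iff (l.map PySem.Str.len)).mp (by simpa using hc))
    simp only [hA, if_true]
    rw [if_neg (by simpa [PySem.Str.len_eq] using hB)]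
    simp [PySem.Dict.empty]
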